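-- pv_equiv track=rewrite | github.com/CrimsonNightZero/KanColle-For-Desktop-Wizard | KanColleViewer_ch.py | compare_text
-- ===== SOURCE A (Python) =====
-- def compare_text(end_text_temp,end_text_temp2):
-- 	i = 0
-- 	j = 0
-- 	while i < 11:
-- 		if end_text_temp in str(i) or end_text_temp in "x":
-- ##			end_text=end_text_temp
-- 			while j < 11:
-- 				if end_text_temp2 in str(j) or end_text_temp2 in "x":
-- ##					end_text2=end_text_temp2
-- 					return end_text_temp, end_text_temp2
-- 				j += 1
-- 			return end_text_temp, ""
-- 		i += 1
-- 	return "", ""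
-- ===== SOURCE B (Python) =====
-- # Valid tokens = all substrings of str(0)..str(10) and of "x".
-- VALID = ("", "0", "1", "2", "3", "4", "5", "6", "7", "8", "9", "10", "x")
--
-- def compare_text(end_text_temp, end_text_temp2):
--     if end_text_temp not in VALID:
--         return "", ""
--     if end_text_temp2 not in VALID:
--         return end_text_temp, ""
--     return end_text_temp, end_text_temp2
-- ===== Notes on version B (the rewrite author's own statement) =====
-- stated objective: simpler
-- what changed: Replaced the two nested counting loops with substring tests against str(0)..str(10) and "x" by a single precomputed tuple of the 13 valid tokens (the closure of those substrings) and direct membership tests in an early-return chain.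
import Mathlib
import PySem

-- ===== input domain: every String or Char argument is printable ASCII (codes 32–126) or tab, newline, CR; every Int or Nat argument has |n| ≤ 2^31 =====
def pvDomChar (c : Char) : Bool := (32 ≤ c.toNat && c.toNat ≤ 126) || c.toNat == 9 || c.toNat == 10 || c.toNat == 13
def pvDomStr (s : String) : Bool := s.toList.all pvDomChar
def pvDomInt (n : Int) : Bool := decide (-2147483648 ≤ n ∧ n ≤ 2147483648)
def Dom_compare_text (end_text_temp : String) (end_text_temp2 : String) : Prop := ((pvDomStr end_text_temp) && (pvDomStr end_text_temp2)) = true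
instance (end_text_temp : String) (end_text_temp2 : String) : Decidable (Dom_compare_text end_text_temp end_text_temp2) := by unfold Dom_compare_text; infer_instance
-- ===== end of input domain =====

-- B replaces A's two nested scanning loops (substring tests against str(0)..str(10) and "x")
-- by one precomputed list of the 13 valid tokens and direct membership tests (objective: simpler).

-- ===== PORT A =====
-- Python's inner 'while j < 11' loop (j starts at 0 whenever it is entered).
def compare_text_inner (t : String) (t2 : String) (j : Int) : String × String :=
  if j < 11 then
    if PySem.Str.isIn t2 (PySem.Int.toStr j) || PySem.Str.isIn t2 "x" then (t, t2)
    else compare_text_inner t t2 (j + 1)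
  else (t, "")
termination_by (11 - j).toNat
decreasing_by omega

-- Python's outer 'while i < 11' loop; j is threaded through unchanged (it is 0 when the inner loop starts).
def compare_text_outer (t : String) (t2 : String) (i : Int) (j : Int) : String × String :=
  if i < 11 then
    if PySem.Str.isIn t (PySem.Int.toStr i) || PySem.Str.isIn t "x" then compare_text_inner t t2 j
    else compare_text_outer t t2 (i + 1) j
  else ("", "")
termination_by (11 - i).toNat
decreasing_by omega

def compare_text (end_text_temp : String) (end_text_temp2 : String) : String × String :=
  compare_text_outer end_text_temp end_text_temp2 0 0

-- ===== PORT B =====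
-- VALID from Source B
def pvValidTokens : List String := ["", "0", "1", "2", "3", "4", "5", "6", "7", "8", "9", "10", "x"]

def compare_text_alt (end_text_temp : String) (end_text_temp2 : String) : String × String :=
  if !(pvValidTokens.contains end_text_temp) then ("", "")
  else if !(pvValidTokens.contains end_text_temp2) then (end_text_temp, "")
  else (end_text_temp, end_text_temp2)

-- ===== PRECONDITION & SPEC =====
def Spec_compare_text (end_text_temp : String) (end_text_temp2 : String) (out : String × String) : Prop := out = compare_text_alt end_text_temp end_text_temp2
instance (end_text_temp : String) (end_text_temp2 : String) (out : String × String) : Decidable (Spec_compare_text end_text_temp end_text_temp2 out) := by unfold Spec_compare_text; infer_instance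

-- ===== CLAIM (what is proved, stated in full; the proofs are below) =====
def Claim_equal_compare_text : Prop := ∀ (end_text_temp : String) (end_text_temp2 : String), Dom_compare_text end_text_temp end_text_temp2 → Spec_compare_text end_text_temp end_text_temp2 (compare_text end_text_temp end_text_temp2)

-- ===== LEMMAS AND PROOFS =====

lemma eq_of_toList_eq (t s : String) (h : t.toList = s.toList) : t = s :=
  String.toList_inj.mp h

lemma isIn_singleton (t s : String) (c : Char) (hs : s.toList = [c]) :
    PySem.Str.isIn t s = true ↔ t = "" ∨ t = s := by
  rw [PySem.Str.isIn_iff_infix, hs]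
  constructor
  · intro h
    rcases List.sublist_cons_iff.mp h.sublist with h1 | ⟨r, hr, hr'⟩
    · left; exact eq_of_toList_eq t "" (by simp_all)
    · right; exact eq_of_toList_eq t s (by simp_all)
  · rintro (rfl | rfl)
    · simp
    · rw [hs]

lemma isIn_ten (t : String) :
    PySem.Str.isIn t "10" = true ↔ t = "" ∨ t = "1" ∨ t = "0" ∨ t = "10" := by
  rw [PySem.Str.isIn_iff_infix, (by decide : ("10" : String).toList = ['1', '0'])]
  constructor
  · intro h
    have hl : t.toList = [] ∨ t.toList = ['1'] ∨ t.toList = ['0'] ∨ t.toList = ['1', '0'] := by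
      rcases List.sublist_cons_iff.mp h.sublist with h1 | ⟨r, hr, hr'⟩
      · rcases List.sublist_cons_iff.mp h1 with h2 | ⟨r2, hr2, hr2'⟩ <;> simp_all
      · rcases List.sublist_cons_iff.mp hr' with h2 | ⟨r2, hr2, hr2'⟩ <;> simp_all
    rcases hl with h | h | h | h
    · exact Or.inl (eq_of_toList_eq t "" (by simp_all))
    · exact Or.inr (Or.inl (eq_of_toList_eq t "1" (by rw [h]; decide)))
    · exact Or.inr (Or.inr (Or.inl (eq_of_toList_eq t "0" (by rw [h]; decide))))
    · exact Or.inr (Or.inr (Or.inr (eq_of_toList_eq t "10" (by rw [h]; decide))))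
  · rintro (rfl | rfl | rfl | rfl) <;> decide

-- Single-step and exit lemmas for the two loops.
lemma inner_step_true (t t2 : String) (j : Int) (hj : j < 11)
    (hc : (PySem.Str.isIn t2 (PySem.Int.toStr j) || PySem.Str.isIn t2 "x") = true) :
    compare_text_inner t t2 j = (t, t2) := by
  rw [compare_text_inner, if_pos hj, hc]; rfl

lemma inner_step_false (t t2 : String) (j : Int) (hj : j < 11)
    (hc : (PySem.Str.isIn t2 (PySem.Int.toStr j) || PySem.Str.isIn t2 "x") = false) :
    compare_text_inner t t2 j = compare_text_inner t t2 (j + 1) := by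
  conv_lhs => rw [compare_text_inner, if_pos hj, hc]
  rfl

lemma inner_exit (t t2 : String) : compare_text_inner t t2 11 = (t, "") := by
  rw [compare_text_inner]; norm_num

lemma outer_step_true (t t2 : String) (i j : Int) (hi : i < 11)
    (hc : (PySem.Str.isIn t (PySem.Int.toStr i) || PySem.Str.isIn t "x") = true) :
    compare_text_outer t t2 i j = compare_text_inner t t2 j := by
  rw [compare_text_outer, if_pos hi, hc]; rfl

lemma outer_step_false (t t2 : String) (i j : Int) (hi : i < 11)
    (hc : (PySem.Str.isIn t (PySem.Int.toStr i) || PySem.Str.isIn t "x") = false) :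
    compare_text_outer t t2 i j = compare_text_outer t t2 (i + 1) j := by
  conv_lhs => rw [compare_text_outer, if_pos hi, hc]
  rfl

lemma outer_exit (t t2 : String) (j : Int) : compare_text_outer t t2 11 j = ("", "") := by
  rw [compare_text_outer]; norm_num

-- From invalidity of t, each of the 12 tested patterns fails as a substring test.
lemma isIn_false_of_invalid (t : String) (h : pvValidTokens.contains t = false) :
    ∀ s ∈ ["0", "1", "2", "3", "4", "5", "6", "7", "8", "9", "10", "x"],
      PySem.Str.isIn t s = false := by
  simp only [pvValidTokens, List.contains_eq_mem, List.mem_cons, List.not_mem_nil,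
    or_false, decide_eq_false_iff_not, not_or] at h
  obtain ⟨h0, h1, h2, h3, h4, h5, h6, h7, h8, h9, hA, hB, hC⟩ := h
  intro s hs
  simp only [List.mem_cons, List.not_mem_nil, or_false] at hs
  have single : ∀ {s' : String} (c : Char), s'.toList = [c] → t ≠ "" → t ≠ s' →
      PySem.Str.isIn t s' = false := by
    intro s' c hc hne1 hne2
    rw [Bool.eq_false_iff]; intro hh
    rcases (isIn_singleton t s' c hc).mp hh with rfl | rfl <;> simp_all
  rcases hs with rfl | rfl | rfl | rfl | rfl | rfl | rfl | rfl | rfl | rfl | rfl | rfl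
  · exact single '0' (by decide) (by simp_all) (by simp_all)
  · exact single '1' (by decide) (by simp_all) (by simp_all)
  · exact single '2' (by decide) (by simp_all) (by simp_all)
  · exact single '3' (by decide) (by simp_all) (by simp_all)
  · exact single '4' (by decide) (by simp_all) (by simp_all)
  · exact single '5' (by decide) (by simp_all) (by simp_all)
  · exact single '6' (by decide) (by simp_all) (by simp_all)
  · exact single '7' (by decide) (by simp_all) (by simp_all)
  · exact single '8' (by decide) (by simp_all) (by simp_all)
  · exact single '9' (by decide) (by simp_all) (by simp_all)
  · rw [Bool.eq_false_iff]; intro hc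
    rcases (isIn_ten t).mp hc with rfl | rfl | rfl | rfl <;> simp_all
  · exact single 'x' (by decide) (by simp_all) (by simp_all)

lemma cond_false_of_invalid (t : String) (h : pvValidTokens.contains t = false) :
    ∀ i ∈ ([0,1,2,3,4,5,6,7,8,9,10] : List Int),
      (PySem.Str.isIn t (PySem.Int.toStr i) || PySem.Str.isIn t "x") = false := by
  have H := isIn_false_of_invalid t h
  intro i hi
  have hx := H "x" (by simp)
  simp only [List.mem_cons, List.not_mem_nil, or_false] at hi
  rcases hi with rfl | rfl | rfl | rfl | rfl | rfl | rfl | rfl | rfl | rfl | rfl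
  · rw [show PySem.Int.toStr 0 = "0" from by decide, H "0" (by simp), hx]; rfl
  · rw [show PySem.Int.toStr 1 = "1" from by decide, H "1" (by simp), hx]; rfl
  · rw [show PySem.Int.toStr 2 = "2" from by decide, H "2" (by simp), hx]; rfl
  · rw [show PySem.Int.toStr 3 = "3" from by decide, H "3" (by simp), hx]; rfl
  · rw [show PySem.Int.toStr 4 = "4" from by decide, H "4" (by simp), hx]; rfl
  · rw [show PySem.Int.toStr 5 = "5" from by decide, H "5" (by simp), hx]; rfl
  · rw [show PySem.Int.toStr 6 = "6" from by decide, H "6" (by simp), hx]; rfl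
  · rw [show PySem.Int.toStr 7 = "7" from by decide, H "7" (by simp), hx]; rfl
  · rw [show PySem.Int.toStr 8 = "8" from by decide, H "8" (by simp), hx]; rfl
  · rw [show PySem.Int.toStr 9 = "9" from by decide, H "9" (by simp), hx]; rfl
  · rw [show PySem.Int.toStr 10 = "10" from by decide, H "10" (by simp), hx]; rfl

lemma inner_invalid (t t2 : String) (h : pvValidTokens.contains t2 = false) :
    compare_text_inner t t2 0 = (t, "") := by
  have C := cond_false_of_invalid t2 h
  rw [inner_step_false t t2 0 (by norm_num) (C 0 (by simp))]; norm_num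
  rw [inner_step_false t t2 1 (by norm_num) (C 1 (by simp))]; norm_num
  rw [inner_step_false t t2 2 (by norm_num) (C 2 (by simp))]; norm_num
  rw [inner_step_false t t2 3 (by norm_num) (C 3 (by simp))]; norm_num
  rw [inner_step_false t t2 4 (by norm_num) (C 4 (by simp))]; norm_num
  rw [inner_step_false t t2 5 (by norm_num) (C 5 (by simp))]; norm_num
  rw [inner_step_false t t2 6 (by norm_num) (C 6 (by simp))]; norm_num
  rw [inner_step_false t t2 7 (by norm_num) (C 7 (by simp))]; norm_num
  rw [inner_step_false t t2 8 (by norm_num) (C 8 (by simp))]; norm_num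
  rw [inner_step_false t t2 9 (by norm_num) (C 9 (by simp))]; norm_num
  rw [inner_step_false t t2 10 (by norm_num) (C 10 (by simp))]; norm_num
  exact inner_exit t t2

lemma inner_valid (t t2 : String) (h : pvValidTokens.contains t2 = true) :
    compare_text_inner t t2 0 = (t, t2) := by
  simp only [pvValidTokens, List.contains_eq_mem, List.mem_cons, List.not_mem_nil,
    or_false, decide_eq_true_eq] at h
  rcases h with rfl | rfl | rfl | rfl | rfl | rfl | rfl | rfl | rfl | rfl | rfl | rfl | rfl
  all_goals
    repeat first
    | (exact inner_step_true t _ _ (by norm_num) (by decide))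
    | (rw [inner_step_false t _ _ (by norm_num) (by decide)]; norm_num)

lemma outer_invalid (t t2 : String) (h : pvValidTokens.contains t = false) :
    compare_text_outer t t2 0 0 = ("", "") := by
  have C := cond_false_of_invalid t h
  rw [outer_step_false t t2 0 0 (by norm_num) (C 0 (by simp))]; norm_num
  rw [outer_step_false t t2 1 0 (by norm_num) (C 1 (by simp))]; norm_num
  rw [outer_step_false t t2 2 0 (by norm_num) (C 2 (by simp))]; norm_num
  rw [outer_step_false t t2 3 0 (by norm_num) (C 3 (by simp))]; norm_num
  rw [outer_step_false t t2 4 0 (by norm_num) (C 4 (by simp))]; norm_num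
  rw [outer_step_false t t2 5 0 (by norm_num) (C 5 (by simp))]; norm_num
  rw [outer_step_false t t2 6 0 (by norm_num) (C 6 (by simp))]; norm_num
  rw [outer_step_false t t2 7 0 (by norm_num) (C 7 (by simp))]; norm_num
  rw [outer_step_false t t2 8 0 (by norm_num) (C 8 (by simp))]; norm_num
  rw [outer_step_false t t2 9 0 (by norm_num) (C 9 (by simp))]; norm_num
  rw [outer_step_false t t2 10 0 (by norm_num) (C 10 (by simp))]; norm_num
  exact outer_exit t t2 0

lemma outer_valid (t t2 : String) (h : pvValidTokens.contains t = true) :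
    compare_text_outer t t2 0 0 = compare_text_inner t t2 0 := by
  simp only [pvValidTokens, List.contains_eq_mem, List.mem_cons, List.not_mem_nil,
    or_false, decide_eq_true_eq] at h
  rcases h with rfl | rfl | rfl | rfl | rfl | rfl | rfl | rfl | rfl | rfl | rfl | rfl | rfl
  all_goals
    repeat first
    | (exact outer_step_true _ t2 _ _ (by norm_num) (by decide))
    | (rw [outer_step_false _ t2 _ _ (by norm_num) (by decide)]; norm_num)

-- ===== VERDICT (by name: the statement is the Claim_ definition above) =====
theorem compare_text_spec : Claim_equal_compare_text := by
  intro t t2 _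
  unfold Spec_compare_text compare_text compare_text_alt
  cases ht : pvValidTokens.contains t with
  | false => simp [outer_invalid t t2 ht]
  | true =>
    rw [outer_valid t t2 ht]
    cases ht2 : pvValidTokens.contains t2 with
    | false => simp [inner_invalid t t2 ht2]
    | true => simp [inner_valid t t2 ht2]
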